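-- pv_equiv track=rewrite | github.com/ayoubzulfiqar/Leetcode-Medium | FindCitiesinEachStateII/find_cities_in_each_state_ii.py | find_cities_in_each_state_ii
-- ===== SOURCE A (Python) =====
-- import collections
--
-- def find_cities_in_each_state_ii(cities_data):
--     state_to_cities = collections.defaultdict(list)
--     for city, state in cities_data:
--         state_to_cities[state].append(city)
--
--     result = {}
--     for state, cities in state_to_cities.items():
--         if len(cities) >= 2:
--             result[state] = cities
--
--     return result
-- ===== SOURCE B (Python) =====
-- import collections
--
-- def find_cities_in_each_state_ii(cities_data):
--     counts = collections.Counter(state for _, state in cities_data)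
--     result = {}
--     for city, state in cities_data:
--         if counts[state] >= 2:
--             result.setdefault(state, []).append(city)
--     return result
-- ===== Notes on version B (the rewrite author's own statement) =====
-- stated objective: alternative
-- what changed: B precomputes a Counter of states in one pass and then builds the result directly in a single filtered pass (setdefault+append only for states occurring >= 2 times), instead of grouping everything into a defaultdict and then filtering oversized groups in a second dict rebuild.
import Mathlib
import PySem

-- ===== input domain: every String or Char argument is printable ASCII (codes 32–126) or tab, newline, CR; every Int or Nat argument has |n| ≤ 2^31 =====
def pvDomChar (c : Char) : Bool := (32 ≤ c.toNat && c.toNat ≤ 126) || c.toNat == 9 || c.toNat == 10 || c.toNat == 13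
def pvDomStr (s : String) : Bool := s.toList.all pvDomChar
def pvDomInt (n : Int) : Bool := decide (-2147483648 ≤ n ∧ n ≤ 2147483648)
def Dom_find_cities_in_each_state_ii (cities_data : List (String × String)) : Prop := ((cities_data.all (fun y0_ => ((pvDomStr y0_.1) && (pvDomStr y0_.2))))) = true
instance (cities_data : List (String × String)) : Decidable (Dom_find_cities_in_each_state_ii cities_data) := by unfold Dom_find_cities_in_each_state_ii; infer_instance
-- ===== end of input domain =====

-- B replaces A's group-everything-then-filter (defaultdict + second dict rebuild) by a
-- precomputed Counter of states and a single filtered build pass (alternative decomposition, same cost).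

-- ===== PORT A =====
-- A: group all cities by state into a defaultdict(list), then rebuild a dict keeping
-- only states with >= 2 cities.  state_to_cities[state].append(city) = modify with default [].
def find_cities_in_each_state_ii (cities_data : List (String × String)) : List (String × List String) :=
  let state_to_cities : PySem.Dict String (List String) :=
    cities_data.foldl (fun d p => d.modify p.2 [] (fun cs => cs ++ [p.1])) PySem.Dict.empty
  let result : PySem.Dict String (List String) :=
    state_to_cities.items.foldl
      (fun r kv => if 2 ≤ kv.2.length then r.insert kv.1 kv.2 else r) PySem.Dict.empty
  result.items

-- ===== PORT B =====
-- B: counts = Counter(state for _, state in cities_data); then one filtered pass with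
-- result.setdefault(state, []).append(city)  =  modify with default [].
def find_cities_in_each_state_ii_alt (cities_data : List (String × String)) : List (String × List String) :=
  let counts : PySem.Dict String Int := PySem.Dict.counter (cities_data.map (fun p => p.2))
  let result : PySem.Dict String (List String) :=
    cities_data.foldl
      (fun r p => if 2 ≤ counts.getD p.2 0 then r.modify p.2 [] (fun cs => cs ++ [p.1]) else r)
      PySem.Dict.empty
  result.items

-- ===== PRECONDITION & SPEC =====
def Spec_find_cities_in_each_state_ii (cities_data : List (String × String)) (out : List (String × List String)) : Prop := out = find_cities_in_each_state_ii_alt cities_data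
instance (cities_data : List (String × String)) (out : List (String × List String)) : Decidable (Spec_find_cities_in_each_state_ii cities_data out) := by unfold Spec_find_cities_in_each_state_ii; infer_instance

-- ===== CLAIM (what is proved, stated in full; the proofs are below) =====
def Claim_equal_find_cities_in_each_state_ii : Prop := ∀ (cities_data : List (String × String)), Dom_find_cities_in_each_state_ii cities_data → Spec_find_cities_in_each_state_ii cities_data (find_cities_in_each_state_ii cities_data)

-- ===== LEMMAS AND PROOFS =====

-- The grouping fold: lookup of a key is the base value ++ the first components matching that key.
theorem pv_getD_group (l : List (String × String)) (d : PySem.Dict String (List String)) (k : String) :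
    (l.foldl (fun d p => d.modify p.2 [] (fun cs => cs ++ [p.1])) d).getD k []
      = d.getD k [] ++ (l.filter (fun p => p.2 == k)).map (fun p => p.1) := by
  induction l generalizing d with
  | nil => simp
  | cons p l ih =>
    simp only [List.foldl_cons, ih, PySem.Dict.getD_modify, List.filter_cons]
    by_cases h : k = p.2
    · simp [h]
    · have h2 : ¬ p.2 = k := fun hh => h hh.symm
      simp [h, h2]

-- set(xs filtered) = set(xs) filtered (first-occurrence order is preserved by filtering).
theorem pv_ofList_filter (Q : String → Bool) (xs : List String) :
    PySem.Set.ofList (xs.filter Q) = (PySem.Set.ofList xs).filter Q := by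
  induction xs with
  | nil => simp [PySem.Set.ofList_nil]
  | cons x xs ih =>
    rw [List.filter_cons, PySem.Set.ofList_cons]
    by_cases h : Q x = true
    · rw [if_pos h, PySem.Set.ofList_cons, ih, List.filter_cons, if_pos h]
      simp [PySem.Set.discard, List.filter_filter, Bool.and_comm]
    · rw [if_neg h, ih, List.filter_cons, if_neg h]
      simp only [PySem.Set.discard, List.filter_filter]
      apply List.filter_congr
      intro y _
      by_cases hy : y = x <;> simp [hy, h]

theorem find_cities_in_each_state_ii_spec' (l : List (String × String)) :
    find_cities_in_each_state_ii l = find_cities_in_each_state_ii_alt l := by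
  unfold find_cities_in_each_state_ii find_cities_in_each_state_ii_alt
  simp only []
  -- notation
  set G : PySem.Dict String (List String) :=
    l.foldl (fun d p => d.modify p.2 [] (fun cs => cs ++ [p.1])) PySem.Dict.empty with hG
  have hkeysG : G.keys = PySem.Set.ofList (l.map (fun p => p.2)) := by
    rw [hG, PySem.Dict.keys_foldl_modify_key l (fun p => p.2) [] (fun _ p cs => cs ++ [p.1])]
    simp [PySem.Set.update_nil_left]
  have hndG : G.keys.Nodup := by
    rw [hkeysG]; exact PySem.Set.nodup_ofList _
  -- A側: filter-out-the-if, fresh inserts append, items as map over keys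
  rw [PySem.List.foldl_ite_eq_foldl_filter (p := fun kv : String × List String => 2 ≤ kv.2.length)]
  have hfresh := PySem.Dict.items_foldl_insert_fresh
      (G.items.filter (fun kv => decide (2 ≤ kv.2.length))) (fun kv => kv.1) (fun kv => kv.2)
      PySem.Dict.empty
      (by intro a _; simp)
      (by
        have hsub : ((G.items.filter (fun kv => decide (2 ≤ kv.2.length))).map (fun kv => kv.1)).Sublist
            (G.items.map (fun kv => kv.1)) := List.Sublist.map _ List.filter_sublist
        exact hsub.nodup hndG)
  have hemp : (PySem.Dict.empty : PySem.Dict String (List String)).items = [] := rfl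
  simp only [hfresh, hemp, List.nil_append, Prod.mk.eta, List.map_id']
  rw [PySem.Dict.items_eq_map_keys G hndG []]
  -- B側
  rw [PySem.List.foldl_ite_eq_foldl_filter
      (p := fun p : String × String => 2 ≤ (PySem.Dict.counter (l.map (fun p => p.2))).getD p.2 0)]
  set Q : String → Bool := fun k => decide (2 ≤ (l.map (fun p => p.2)).count k) with hQ
  have hpred : (fun p : String × String =>
      decide (2 ≤ (PySem.Dict.counter (l.map (fun p => p.2))).getD p.2 0)) = fun p => Q p.2 := by
    funext p
    simp only [hQ, PySem.Dict.getD_counter]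
    by_cases h : 2 ≤ (l.map (fun p => p.2)).count p.2
    · simp [h]
    · have : ¬ (2:Int) ≤ ((l.map (fun p => p.2)).count p.2 : Nat) := by exact_mod_cast h
      simp [h, this]
  rw [hpred]
  set l2 : List (String × String) := l.filter (fun p => Q p.2) with hl2
  set R : PySem.Dict String (List String) :=
    l2.foldl (fun d p => d.modify p.2 [] (fun cs => cs ++ [p.1])) PySem.Dict.empty with hR
  have hkeysR : R.keys = PySem.Set.ofList (l2.map (fun p => p.2)) := by
    rw [hR, PySem.Dict.keys_foldl_modify_key l2 (fun p => p.2) [] (fun _ p cs => cs ++ [p.1])]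
    simp [PySem.Set.update_nil_left]
  have hndR : R.keys.Nodup := by rw [hkeysR]; exact PySem.Set.nodup_ofList _
  rw [PySem.Dict.items_eq_map_keys R hndR []]
  -- keys of R = keys of G filtered by Q
  have hmapfilter : l2.map (fun p => p.2) = (l.map (fun p => p.2)).filter Q := by
    rw [hl2, List.filter_map]; rfl
  have hkeysR' : R.keys = G.keys.filter Q := by
    rw [hkeysR, hmapfilter, hkeysG, pv_ofList_filter]
  -- A side: push the filter through the map
  rw [List.filter_map]
  -- the A-side filter predicate over keys is Q
  have hfiltpred : ((fun kv : String × List String => decide (2 ≤ kv.2.length)) ∘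
      fun k => (k, G.getD k [])) = Q := by
    funext k
    simp only [Function.comp, hQ]
    have : (G.getD k []).length = (l.map (fun p => p.2)).count k := by
      rw [hG, pv_getD_group]
      simp only [PySem.Dict.getD_empty, List.nil_append, List.length_map,
        ← List.countP_eq_length_filter, List.count_eq_countP, List.countP_map]
      rfl
    rw [this]
  rw [hfiltpred, hkeysR']
  -- values agree on every surviving key
  apply List.map_congr_left
  intro k hk
  have hQk : Q k = true := (List.mem_filter.mp hk).2
  have : (fun p : String × String => p.2 == k && Q p.2) = fun p => p.2 == k := by
    funext p
    by_cases h : p.2 = k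
    · simp [h, hQk]
    · simp [h]
  have hv : R.getD k [] = G.getD k [] := by
    rw [hR, hG, pv_getD_group, pv_getD_group, hl2, List.filter_filter, this]
  simp only [hv]

-- ===== VERDICT (by name: the statement is the Claim_ definition above) =====
theorem find_cities_in_each_state_ii_spec : Claim_equal_find_cities_in_each_state_ii := by
  intro l _
  exact find_cities_in_each_state_ii_spec' l
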